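-- pv_equiv track=rewrite | github.com/cynapse-zip/algorithm-study | 프로그래머스/2/132265. 롤케이크 자르기/롤케이크 자르기.py | solution
-- ===== SOURCE A (Python) =====
-- def solution(topping):
--
--     # 투포인터 + dict
--     # 1) dict로 동생의 토핑 갯수 관리하기
--     brother = {}
--     for i in range(len(topping)):
--         key = topping[i]
--         brother[key] = brother.get(key, 0) + 1  # key값이 없으면 0
--
--     # 2) 컷 이동
--     cheolsu = set()
--     answer = 0
--     for i in range(len(topping)-1):     # 맨 끝은 제외하고 컷 이동
--         topp = topping[i]
--
--         # 왼쪽에 있는 철수 몫에 추가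
--         cheolsu.add(topp)
--         # 남은 토핑에서 빼주기
--         brother[topp] -= 1
--         if brother[topp] == 0:    # 토핑 수가 0이면 dict에서 제거
--             del brother[topp]
--
--         # 철수와 동생의 토핑 갯수 비교
--         if len(cheolsu) == len(brother):
--             answer += 1
--
--     return answer
-- ===== SOURCE B (Python) =====
-- def solution(topping):
--     # Precompute suffix distinct counts right-to-left, then one forward pass with a left set.
--     right = []  # after reversing: right[i] = number of distinct toppings in topping[i:]
--     seen = set()
--     for x in reversed(topping):
--         seen.add(x)
--         right.append(len(seen))
--     right.reverse()
--     left = set()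
--     answer = 0
--     for i in range(len(topping) - 1):
--         left.add(topping[i])
--         if len(left) == right[i + 1]:
--             answer += 1
--     return answer
-- ===== Notes on version B (the rewrite author's own statement) =====
-- stated objective: alternative
-- what changed: Replaces A's maintained decrementing remaining-count dict (with deletion of exhausted keys) by a precomputed suffix table of distinct counts built right-to-left with a set, followed by a single forward pass that only keeps a left-side set and compares its size to the table entry.
import Mathlib
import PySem

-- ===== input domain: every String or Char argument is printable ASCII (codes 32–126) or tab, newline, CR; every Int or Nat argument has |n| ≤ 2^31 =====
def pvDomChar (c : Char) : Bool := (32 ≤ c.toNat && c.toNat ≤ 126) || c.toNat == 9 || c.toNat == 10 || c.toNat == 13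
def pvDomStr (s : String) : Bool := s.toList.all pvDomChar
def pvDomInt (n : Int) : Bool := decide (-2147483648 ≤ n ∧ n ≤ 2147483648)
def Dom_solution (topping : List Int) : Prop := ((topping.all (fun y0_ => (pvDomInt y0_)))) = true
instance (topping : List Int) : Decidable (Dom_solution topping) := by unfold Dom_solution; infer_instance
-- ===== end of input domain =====

-- B replaces A's decrementing remaining-count dict by a precomputed suffix distinct-count
-- table plus a forward pass with a left-side set (objective: alternative decomposition).

-- ===== PORT A =====
-- one iteration of A's cut-moving loop (i is the Python loop index)
def solutionStep (topping : List Int)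
    (st : PySem.Set Int × PySem.Dict Int Int × Int) (i : Int) :
    PySem.Set Int × PySem.Dict Int Int × Int :=
  let topp := PySem.List.pyGetD topping i 0   -- index always in range in A's loop
  let cheolsu := st.1.add topp
  let d1 := st.2.1.insert topp (st.2.1.getD topp 0 - 1)
  let brother := if d1.getD topp 0 = 0 then d1.erase topp else d1
  let answer := if cheolsu.len = (brother.size : Int) then st.2.2 + 1 else st.2.2
  (cheolsu, brother, answer)

def solution (topping : List Int) : Int :=
  let brother := topping.foldl (fun d x => d.insert x (d.getD x 0 + 1))
      (PySem.Dict.empty : PySem.Dict Int Int)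
  let st := (PySem.List.pyRange 0 (PySem.List.len topping - 1)).foldl
      (solutionStep topping) (PySem.Set.empty, brother, 0)
  st.2.2

-- ===== PORT B =====
-- one iteration of B's backward pass: grow the seen set, append its size
def altRightStep (st : PySem.Set Int × List Int) (x : Int) :
    PySem.Set Int × List Int :=
  let seen := st.1.add x
  (seen, st.2 ++ [seen.len])

-- one iteration of B's forward pass over cut positions
def altFwdStep (topping right : List Int) (st : PySem.Set Int × Int) (i : Int) :
    PySem.Set Int × Int :=
  let left := st.1.add (PySem.List.pyGetD topping i 0)
  let answer := if left.len = PySem.List.pyGetD right (i + 1) 0 then st.2 + 1 else st.2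
  (left, answer)

def solution_alt (topping : List Int) : Int :=
  let acc := topping.reverse.foldl altRightStep (PySem.Set.empty, [])
  let right := acc.2.reverse
  let st := (PySem.List.pyRange 0 (PySem.List.len topping - 1)).foldl
      (altFwdStep topping right) (PySem.Set.empty, 0)
  st.2

-- ===== PRECONDITION & SPEC =====
def Spec_solution (topping : List Int) (out : Int) : Prop := out = solution_alt topping
instance (topping : List Int) (out : Int) : Decidable (Spec_solution topping out) := by unfold Spec_solution; infer_instance

-- ===== CLAIM (what is proved, stated in full; the proofs are below) =====
def Claim_equal_solution : Prop := ∀ (topping : List Int), Dom_solution topping → Spec_solution topping (solution topping)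

-- ===== LEMMAS AND PROOFS =====

-- number of distinct elements of a list
def dcount (l : List Int) : Nat := (PySem.Set.ofList l).length

-- indicator of cut i being valid: prefix and suffix have equally many distinct toppings
def pvInd (t : List Int) (i : Nat) : Int :=
  if dcount (t.take (i + 1)) = dcount (t.drop (i + 1)) then 1 else 0

-- A's dict invariant: brother is exactly the (positive-count) counter of the suffix
def pvInv (d : PySem.Dict Int Int) (suf : List Int) : Prop :=
  d.keys.Nodup ∧
    ∀ k : Int, d.get? k = if 0 < suf.count k then some ((suf.count k : Nat) : Int) else none

lemma find?_filter_ne (ps : List (Int × Int)) {k k' : Int} (h : k' ≠ k) :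
    (ps.filter (fun p => !(p.1 == k))).find? (fun p => p.1 == k') =
      ps.find? (fun p => p.1 == k') := by
  induction ps with
  | nil => rfl
  | cons p ps ih =>
    by_cases h1 : p.1 = k
    · simp only [List.filter_cons, h1, BEq.rfl, Bool.not_true, Bool.false_eq_true, if_false, ih]
      have hpk : (p.1 == k') = false := by
        simp [h1]
        exact fun e => h e.symm
      simp [hpk]
    · by_cases h2 : p.1 = k'
      · simp [h2, h]
      · simp [h1, h2, ih]

lemma get?_erase_self (d : PySem.Dict Int Int) (k : Int) :
    (d.erase k).get? k = none := by
  simp [PySem.Dict.erase, PySem.Dict.get?]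

lemma get?_erase_of_ne (d : PySem.Dict Int Int) {k k' : Int} (h : k' ≠ k) :
    (d.erase k).get? k' = d.get? k' := by
  simp [PySem.Dict.erase, PySem.Dict.get?, find?_filter_ne _ h]

lemma nodup_keys_erase (d : PySem.Dict Int Int) (k : Int) (h : d.keys.Nodup) :
    (d.erase k).keys.Nodup := by
  have hs : (d.erase k).keys.Sublist d.keys := by
    simpa [PySem.Dict.erase, PySem.Dict.keys] using
      (List.filter_sublist (l := d.items) (p := fun p => !(p.1 == k))).map (·.1)
  exact hs.nodup h

lemma dcount_congr {l₁ l₂ : List Int} (h : ∀ x, x ∈ l₁ ↔ x ∈ l₂) :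
    dcount l₁ = dcount l₂ := by
  unfold dcount
  exact ((List.perm_ext_iff_of_nodup (PySem.Set.nodup_ofList _)
    (PySem.Set.nodup_ofList _)).2 (by simp [PySem.Set.mem_ofList, h])).length_eq

lemma pvInv_counter (t : List Int) : pvInv (PySem.Dict.counter t) t := by
  refine ⟨PySem.Dict.nodup_keys_counter t, fun k => ?_⟩
  by_cases h : 0 < t.count k
  · have hc : (PySem.Dict.counter t).contains k = true := by
      rw [PySem.Dict.contains_counter]
      simpa [List.elem_eq_contains] using List.count_pos_iff.mp h
    have hsome : ((PySem.Dict.counter t).get? k).isSome := by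
      rw [← PySem.Dict.contains_eq_isSome_get?, hc]
    obtain ⟨v, hv⟩ := Option.isSome_iff_exists.mp hsome
    have hgd : (PySem.Dict.counter t).getD k 0 = v := by
      simp [PySem.Dict.getD, hv]
    rw [PySem.Dict.getD_counter] at hgd
    simp [hv, h, ← hgd]
  · have hmem : k ∉ t := fun hm => h (List.count_pos_iff.mpr hm)
    have hc : (PySem.Dict.counter t).contains k = false := by
      rw [PySem.Dict.contains_counter]
      simpa using hmem
    rw [(PySem.Dict.get?_eq_none_iff_contains _ _).mpr hc]
    simp [h]

lemma pvInv_size {d : PySem.Dict Int Int} {suf : List Int} (h : pvInv d suf) :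
    d.size = dcount suf := by
  have hlen : d.size = d.keys.length := by
    simp [PySem.Dict.size, PySem.Dict.keys]
  rw [hlen, dcount]
  refine ((List.perm_ext_iff_of_nodup h.1 (PySem.Set.nodup_ofList suf)).2 ?_).length_eq
  intro a
  rw [PySem.Set.mem_ofList]
  constructor
  · intro ha
    have hne : d.get? a ≠ none := by
      rw [Ne, PySem.Dict.get?_eq_none_iff_not_mem_keys]; simpa using ha
    by_cases hc : 0 < suf.count a
    · exact List.count_pos_iff.mp hc
    · rw [h.2 a] at hne; simp [hc] at hne
  · intro ha
    have hc : 0 < suf.count a := List.count_pos_iff.mpr ha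
    by_contra hk
    have := PySem.Dict.get?_eq_none_iff_not_mem_keys d a |>.mpr hk
    rw [h.2 a] at this
    simp [hc] at this

lemma pvInv_step {d : PySem.Dict Int Int} {x : Int} {rest : List Int}
    (h : pvInv d (x :: rest)) :
    pvInv (if (d.insert x (d.getD x 0 - 1)).getD x 0 = 0
            then (d.insert x (d.getD x 0 - 1)).erase x
            else d.insert x (d.getD x 0 - 1)) rest := by
  have hx : d.get? x = some (((rest.count x : Nat) : Int) + 1) := by
    have := h.2 x
    rw [List.count_cons_self] at this
    simpa [Nat.cast_add] using this
  have hgd : d.getD x 0 = ((rest.count x : Nat) : Int) + 1 := by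
    simp [PySem.Dict.getD, hx]
  have hgd1 : (d.insert x (d.getD x 0 - 1)).getD x 0 = ((rest.count x : Nat) : Int) := by
    rw [PySem.Dict.getD_insert_self, hgd]; ring
  have hnd1 : (d.insert x (d.getD x 0 - 1)).keys.Nodup :=
    PySem.Dict.nodup_keys_insert d x _ h.1
  by_cases hz : rest.count x = 0
  · have hcond : (d.insert x (d.getD x 0 - 1)).getD x 0 = 0 := by
      rw [hgd1, hz]; rfl
    rw [if_pos hcond]
    refine ⟨nodup_keys_erase _ _ hnd1, fun k => ?_⟩
    by_cases hk : k = x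
    · subst hk
      rw [get?_erase_self]
      simp [hz]
    · rw [get?_erase_of_ne _ hk, PySem.Dict.get?_insert_of_ne _ _ hk]
      have := h.2 k
      rwa [List.count_cons_of_ne (fun e => hk e.symm)] at this
  · have hcond : ¬ (d.insert x (d.getD x 0 - 1)).getD x 0 = 0 := by
      rw [hgd1]
      exact_mod_cast hz
    rw [if_neg hcond]
    refine ⟨hnd1, fun k => ?_⟩
    by_cases hk : k = x
    · subst hk
      rw [PySem.Dict.get?_insert_self, hgd]
      have hpos : 0 < rest.count k := Nat.pos_of_ne_zero hz
      simp [hpos]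
    · rw [PySem.Dict.get?_insert_of_ne _ _ hk]
      have := h.2 k
      rwa [List.count_cons_of_ne (fun e => hk e.symm)] at this

lemma take_succ_of_lt {t : List Int} {m : Nat} (hm : m < t.length) :
    t.take (m + 1) = t.take m ++ [t[m]] := by
  rw [List.take_add_one, List.getElem?_eq_getElem hm]
  rfl

lemma A_loop (t : List Int) (m : Nat) (hm : m ≤ t.length) :
    ∃ d, ((List.map (fun k : Nat => (k : Int)) (List.range m)).foldl (solutionStep t)
        (PySem.Set.empty, PySem.Dict.counter t, 0))
      = (PySem.Set.ofList (t.take m), d, ((List.range m).map (pvInd t)).sum)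
      ∧ pvInv d (t.drop m) := by
  induction m with
  | zero =>
    exact ⟨PySem.Dict.counter t,
      by simp [PySem.Set.ofList_nil, PySem.Set.empty_eq], pvInv_counter t⟩
  | succ m ih =>
    have hmlt : m < t.length := hm
    obtain ⟨d, heq, hinv⟩ := ih hmlt.le
    rw [List.range_succ, List.map_append, List.foldl_append, heq]
    have hdrop : t.drop m = t[m] :: t.drop (m + 1) := List.drop_eq_getElem_cons hmlt
    rw [hdrop] at hinv
    have hget : PySem.List.pyGetD t ((m : Nat) : Int) 0 = t[m] := by
      rw [PySem.List.pyGetD_natCast]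
      exact List.getD_eq_getElem t 0 hmlt
    refine ⟨_, ?_, pvInv_step hinv⟩
    simp only [List.map_cons, List.map_nil, List.foldl_cons, List.foldl_nil,
      solutionStep, hget]
    have hset : (PySem.Set.ofList (t.take m)).add t[m] = PySem.Set.ofList (t.take (m + 1)) := by
      rw [take_succ_of_lt hmlt, PySem.Set.ofList_append_singleton]
    have hsize : (if (d.insert t[m] (d.getD t[m] 0 - 1)).getD t[m] 0 = 0
            then (d.insert t[m] (d.getD t[m] 0 - 1)).erase t[m]
            else d.insert t[m] (d.getD t[m] 0 - 1)).size = dcount (t.drop (m + 1)) :=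
      pvInv_size (pvInv_step hinv)
    have hcond : (PySem.Set.ofList (t.take (m + 1))).len
          = ((dcount (t.drop (m + 1)) : Nat) : Int)
        ↔ dcount (t.take (m + 1)) = dcount (t.drop (m + 1)) := by
      rw [PySem.Set.len_eq]
      exact Nat.cast_inj
    rw [List.map_append, List.sum_append]
    simp only [hsize, hset]
    by_cases hc : dcount (t.take (m + 1)) = dcount (t.drop (m + 1))
    · rw [if_pos (hcond.mpr hc)]
      simp [pvInd, hc]
    · rw [if_neg (fun hh => hc (hcond.mp hh))]
      simp [pvInd, hc]

lemma R_loop (l : List Int) (s : PySem.Set Int) (acc : List Int) :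
    l.foldl altRightStep (s, acc)
      = (s.update l,
         acc ++ (List.range l.length).map
            (fun j => (((s.update (l.take (j + 1))) : List Int).length : Int))) := by
  induction l generalizing s acc with
  | nil => simp [PySem.Set.update]
  | cons x xs ih =>
    rw [List.foldl_cons]
    show xs.foldl altRightStep (s.add x, acc ++ [(s.add x).len]) = _
    rw [ih]
    refine Prod.ext (by simp [PySem.Set.update_cons]) ?_
    simp only [List.length_cons, List.range_succ_eq_map, List.map_cons, List.map_map]
    rw [List.append_assoc]
    congr 1

lemma right_get (t : List Int) (i : Nat) (hi : i < t.length) :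
    PySem.List.pyGetD
      (((List.range t.reverse.length).map
          (fun j => (((PySem.Set.ofList (t.reverse.take (j + 1))) : List Int).length : Int))).reverse)
      ((i : Nat) : Int) 0 = ((dcount (t.drop i) : Nat) : Int) := by
  rw [PySem.List.pyGetD_natCast]
  have hlen : (((List.range t.reverse.length).map
      (fun j => (((PySem.Set.ofList (t.reverse.take (j + 1))) : List Int).length : Int))).reverse).length
      = t.length := by simp
  have hi' : i < (((List.range t.reverse.length).map
      (fun j => (((PySem.Set.ofList (t.reverse.take (j + 1))) : List Int).length : Int))).reverse).length := by
    rw [hlen]; exact hi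
  rw [List.getD_eq_getElem _ 0 hi', List.getElem_reverse]
  simp only [List.length_map, List.length_range, List.length_reverse]
  rw [List.getElem_map, List.getElem_range]
  have harith : t.length - 1 - i + 1 = t.length - i := by omega
  rw [harith, List.take_reverse]
  have harith2 : t.length - (t.length - i) = i := by omega
  rw [harith2]
  have : dcount (t.drop i).reverse = dcount (t.drop i) :=
    dcount_congr (fun x => List.mem_reverse)
  unfold dcount at this ⊢
  rw [this]

lemma B_loop (t : List Int) (m : Nat) (hm : m + 1 ≤ t.length) :
    ((List.map (fun k : Nat => (k : Int)) (List.range m)).foldl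
        (altFwdStep t
          (((List.range t.reverse.length).map
              (fun j => (((PySem.Set.ofList (t.reverse.take (j + 1))) : List Int).length : Int))).reverse))
        (PySem.Set.empty, 0))
      = (PySem.Set.ofList (t.take m), ((List.range m).map (pvInd t)).sum) := by
  induction m with
  | zero => simp [PySem.Set.ofList_nil, PySem.Set.empty_eq]
  | succ m ih =>
    have hmlt : m < t.length := by omega
    have hm1 : m + 1 < t.length := by omega
    rw [List.range_succ, List.map_append, List.foldl_append, ih (by omega)]
    have hget : PySem.List.pyGetD t ((m : Nat) : Int) 0 = t[m] := by
      rw [PySem.List.pyGetD_natCast]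
      exact List.getD_eq_getElem t 0 hmlt
    have hr : ((m : Nat) : Int) + 1 = (((m + 1 : Nat)) : Int) := by push_cast; ring
    simp only [List.map_cons, List.map_nil, List.foldl_cons, List.foldl_nil,
      altFwdStep, hget, hr]
    rw [right_get t (m + 1) hm1]
    have hset : (PySem.Set.ofList (t.take m)).add t[m] = PySem.Set.ofList (t.take (m + 1)) := by
      rw [take_succ_of_lt hmlt, PySem.Set.ofList_append_singleton]
    rw [List.map_append, List.sum_append]
    refine Prod.ext (by simpa using hset) ?_
    simp only [hset, PySem.Set.len_eq]
    by_cases hc : dcount (t.take (m + 1)) = dcount (t.drop (m + 1))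
    · rw [if_pos (by exact_mod_cast congrArg (Nat.cast (R := Int)) hc)]
      simp [pvInd, hc]
    · rw [if_neg (by exact_mod_cast fun hh => hc (Nat.cast_injective hh))]
      simp [pvInd, hc]

lemma len_sub_one (t : List Int) (ht : t ≠ []) :
    PySem.List.len t - 1 = (((t.length - 1 : Nat)) : Int) := by
  have : 1 ≤ t.length := List.length_pos_iff.mpr ht
  simp only [PySem.List.len]
  omega

-- ===== VERDICT (by name: the statement is the Claim_ definition above) =====
theorem solution_spec : Claim_equal_solution := by
  intro t _
  unfold Spec_solution
  by_cases ht : t = []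
  · subst ht; rfl
  · have hn : 1 ≤ t.length := List.length_pos_iff.mpr ht
    unfold solution solution_alt
    rw [PySem.Dict.foldl_insert_getD_add_one_eq_counter]
    rw [R_loop]
    simp only [len_sub_one t ht, PySem.List.pyRange_zero_natCast,
      PySem.Set.update_empty, List.nil_append]
    obtain ⟨d, heq, -⟩ := A_loop t (t.length - 1) (by omega)
    rw [heq, B_loop t (t.length - 1) (by omega)]
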